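-- pv_equiv track=rewrite | github.com/vultor33/StereoisomerIdentifier | code/python/FormulaHandling.py | _chelationsConflict
-- ===== SOURCE A (Python) =====
-- def _chelationsConflict(chelations):
-- 	# two chelates pointing to the same ligand
-- 	i = 0
-- 	j = 0
-- 	while i < len(chelations) - 1:
-- 		j = i + 1
-- 		while j < len(chelations):
-- 			for chelI in chelations[i]:
-- 				for chelJ in chelations[j]:
-- 					if chelI == chelJ:
-- 						return True
-- 			j+=1
-- 		i+=1
--
-- 	return False
-- ===== SOURCE B (Python) =====
-- def _chelationsConflict(chelations):
--     # Build a frequency table: each element counted once per distinct group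
--     # it appears in; a conflict exists iff some element occurs in >= 2 groups.
--     counts = {}
--     for group in chelations:
--         for e in dict.fromkeys(group):
--             counts[e] = counts.get(e, 0) + 1
--     return any(v >= 2 for v in counts.values())
-- ===== Notes on version B (the rewrite author's own statement) =====
-- stated objective: alternative
-- what changed: Replaces A's quadratic pairwise nested scan over all group pairs with a two-phase build-index-then-scan: one pass builds a per-element count of how many distinct groups contain it (deduplicating within each group), then a separate scan checks whether any count reaches 2.
import Mathlib
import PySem

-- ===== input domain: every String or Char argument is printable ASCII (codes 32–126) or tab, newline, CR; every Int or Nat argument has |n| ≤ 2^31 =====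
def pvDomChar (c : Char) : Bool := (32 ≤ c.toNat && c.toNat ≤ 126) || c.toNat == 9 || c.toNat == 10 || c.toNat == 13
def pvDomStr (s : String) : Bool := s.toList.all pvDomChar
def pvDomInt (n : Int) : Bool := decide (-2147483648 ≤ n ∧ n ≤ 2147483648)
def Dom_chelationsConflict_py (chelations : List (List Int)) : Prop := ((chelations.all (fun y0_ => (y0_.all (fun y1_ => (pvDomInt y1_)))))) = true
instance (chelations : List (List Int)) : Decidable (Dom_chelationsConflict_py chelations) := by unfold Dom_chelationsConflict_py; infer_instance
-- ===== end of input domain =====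

-- B replaces A's pairwise nested scan with a build-a-count-table pass followed by a scan of the table (alternative decomposition; return value only).

-- ===== PORT A =====
-- inner 'while j < len(chelations)' loop (structural recursion on a fuel counter ≥ the
-- remaining iterations; the two 'for' loops with early 'return True' are the .any over
-- chelations[i] × chelations[j])
def chelationsConflict_py_inner (gi : List Int) (chel : List (List Int)) : Nat → Nat → Bool
  | 0, _ => false
  | fuel + 1, j =>
    if h : j < chel.length then
      if gi.any (fun chelI => (chel[j]).any (fun chelJ => chelI == chelJ)) then true
      else chelationsConflict_py_inner gi chel fuel (j + 1)
    else false

-- outer 'while i < len(chelations) - 1' loop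
def chelationsConflict_py_outer (chel : List (List Int)) : Nat → Nat → Bool
  | 0, _ => false
  | fuel + 1, i =>
    if h : i < chel.length - 1 then
      if chelationsConflict_py_inner (chel[i]'(by omega)) chel chel.length (i + 1) then true
      else chelationsConflict_py_outer chel fuel (i + 1)
    else false

def chelationsConflict_py (chelations : List (List Int)) : Bool :=
  chelationsConflict_py_outer chelations chelations.length 0

-- ===== PORT B =====
def chelationsConflict_py_alt (chelations : List (List Int)) : Bool :=
  let counts : PySem.Dict Int Int :=
    chelations.foldl
      (fun d group =>
        (PySem.List.dedup group).foldl (fun d e => d.insert e (d.getD e 0 + 1)) d)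
      PySem.Dict.empty
  counts.values.any (fun v => decide (2 ≤ v))

-- ===== PRECONDITION & SPEC =====
def Spec_chelationsConflict_py (chelations : List (List Int)) (out : Bool) : Prop := out = chelationsConflict_py_alt chelations
instance (chelations : List (List Int)) (out : Bool) : Decidable (Spec_chelationsConflict_py chelations out) := by unfold Spec_chelationsConflict_py; infer_instance

-- ===== CLAIM (what is proved, stated in full; the proofs are below) =====
def Claim_equal_chelationsConflict_py : Prop := ∀ (chelations : List (List Int)), Dom_chelationsConflict_py chelations → Spec_chelationsConflict_py chelations (chelationsConflict_py chelations)

-- ===== LEMMAS AND PROOFS =====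

-- whether two groups share an element (A's innermost double loop)
def pvPairP (g h : List Int) : Bool := g.any (fun x => h.any (fun y => x == y))

-- A's pair scan, restated structurally on the list
def pvPairsAny : List (List Int) → Bool
  | [] => false
  | g :: rest => rest.any (pvPairP g) || pvPairsAny rest

lemma inner_eq_any (gi : List Int) (chel : List (List Int)) (fuel j : Nat)
    (hf : chel.length ≤ fuel + j) :
    chelationsConflict_py_inner gi chel fuel j = (chel.drop j).any (pvPairP gi) := by
  induction fuel generalizing j with
  | zero =>
    rw [List.drop_eq_nil_of_le (by omega)]
    rfl
  | succ fuel ih =>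
    rw [chelationsConflict_py_inner]
    split
    · rename_i h
      rw [List.drop_eq_getElem_cons h, List.any_cons, ih (j + 1) (by omega)]
      show (if pvPairP gi chel[j] = true then true else (chel.drop (j + 1)).any (pvPairP gi)) = _
      by_cases hb : pvPairP gi chel[j] = true <;> simp [hb]
    · rename_i h
      rw [List.drop_eq_nil_of_le (by omega)]
      rfl

lemma outer_eq_pairsAny (chel : List (List Int)) (fuel i : Nat)
    (hf : chel.length ≤ fuel + i + 1) :
    chelationsConflict_py_outer chel fuel i = pvPairsAny (chel.drop i) := by
  induction fuel generalizing i with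
  | zero =>
    have hlen : (chel.drop i).length ≤ 1 := by
      simp only [List.length_drop]; omega
    cases hd : chel.drop i with
    | nil => rfl
    | cons g rest =>
      cases rest with
      | nil => simp [pvPairsAny, chelationsConflict_py_outer]
      | cons g' rest' => rw [hd] at hlen; simp at hlen
  | succ fuel ih =>
    rw [chelationsConflict_py_outer]
    split
    · rename_i h
      rw [List.drop_eq_getElem_cons (by omega : i < chel.length)]
      rw [ih (i + 1) (by omega)]
      rw [inner_eq_any _ _ _ _ (by omega)]
      simp only [pvPairsAny]
      by_cases hb : (chel.drop (i + 1)).any (pvPairP (chel[i]'(by omega))) = true <;>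
        simp [hb]
    · rename_i h
      have hlen : (chel.drop i).length ≤ 1 := by
        simp only [List.length_drop]; omega
      cases hd : chel.drop i with
      | nil => rfl
      | cons g rest =>
        cases rest with
        | nil => simp [pvPairsAny]
        | cons g' rest' => rw [hd] at hlen; simp at hlen

lemma count_dedup (g : List Int) (x : Int) :
    (PySem.List.dedup g).count x = if x ∈ g then 1 else 0 := by
  by_cases hx : x ∈ g
  · simp only [hx, if_true]
    have h1 : (PySem.List.dedup g).count x ≤ 1 :=
      List.nodup_iff_count_le_one.mp (PySem.List.nodup_dedup g) x
    have h2 : 0 < (PySem.List.dedup g).count x :=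
      List.count_pos_iff.mpr ((PySem.List.mem_dedup _ _).mpr hx)
    omega
  · simp only [hx, if_false]
    exact List.count_eq_zero.mpr (fun hm => hx ((PySem.List.mem_dedup _ _).mp hm))

lemma pairsAny_iff (l : List (List Int)) :
    pvPairsAny l = true ↔ ∃ x : Int, 2 ≤ (l.flatMap PySem.List.dedup).count x := by
  induction l with
  | nil => simp [pvPairsAny]
  | cons g rest ih =>
    simp only [pvPairsAny, List.flatMap_cons, List.count_append, Bool.or_eq_true,
      List.any_eq_true, ih]
    constructor
    · rintro (⟨h, hh, hp⟩ | ⟨x, hx⟩)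
      · simp only [pvPairP, List.any_eq_true, beq_iff_eq] at hp
        obtain ⟨x, hxg, y, hyh, rfl⟩ := hp
        refine ⟨x, ?_⟩
        have h1 : (PySem.List.dedup g).count x = 1 := by rw [count_dedup, if_pos hxg]
        have h2 : 0 < (rest.flatMap PySem.List.dedup).count x :=
          List.count_pos_iff.mpr (List.mem_flatMap.mpr ⟨h, hh, (PySem.List.mem_dedup _ _).mpr hyh⟩)
        omega
      · exact ⟨x, by omega⟩
    · rintro ⟨x, hx⟩
      by_cases hxg : x ∈ g
      · left
        have h1 : (PySem.List.dedup g).count x = 1 := by rw [count_dedup, if_pos hxg]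
        have h2 : 0 < (rest.flatMap PySem.List.dedup).count x := by omega
        obtain ⟨h, hh, hxh⟩ := List.mem_flatMap.mp (List.count_pos_iff.mp h2)
        refine ⟨h, hh, ?_⟩
        simp only [pvPairP, List.any_eq_true, beq_iff_eq]
        exact ⟨x, hxg, x, (PySem.List.mem_dedup _ _).mp hxh, rfl⟩
      · right
        have h1 : (PySem.List.dedup g).count x = 0 := by rw [count_dedup, if_neg hxg]
        exact ⟨x, by omega⟩

lemma alt_iff (chel : List (List Int)) :
    chelationsConflict_py_alt chel = true ↔
      ∃ x : Int, 2 ≤ (chel.flatMap PySem.List.dedup).count x := by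
  unfold chelationsConflict_py_alt
  have hfold :
      chel.foldl
        (fun d group =>
          (PySem.List.dedup group).foldl (fun d e => d.insert e (d.getD e 0 + 1)) d)
        PySem.Dict.empty
      = PySem.Dict.counter (chel.flatMap PySem.List.dedup) := by
    rw [← PySem.Dict.foldl_insert_getD_add_one_eq_counter, List.flatMap_def,
      List.foldl_flatten, List.foldl_map]
  rw [hfold]
  simp only [List.any_eq_true, PySem.Dict.values, PySem.Dict.items_counter,
    List.map_map, List.mem_map, Function.comp, decide_eq_true_eq]
  constructor
  · rintro ⟨v, ⟨k, hk, rfl⟩, h2⟩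
    exact ⟨k, by exact_mod_cast h2⟩
  · rintro ⟨x, hx⟩
    have hmem : x ∈ chel.flatMap PySem.List.dedup := List.count_pos_iff.mp (by omega)
    exact ⟨_, ⟨x, (PySem.Set.mem_ofList _ _).mpr hmem, rfl⟩, by exact_mod_cast hx⟩

-- ===== VERDICT (by name: the statement is the Claim_ definition above) =====
theorem chelationsConflict_py_spec : Claim_equal_chelationsConflict_py := by
  intro chel _
  unfold Spec_chelationsConflict_py
  rw [Bool.eq_iff_iff]
  rw [chelationsConflict_py, outer_eq_pairsAny chel chel.length 0 (by omega), List.drop_zero, pairsAny_iff, alt_iff]
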